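-- pv_equiv track=rewrite | github.com/spv360/spherevista360 | production-deployment/tools/master_toolkit/archived/add_images_simple.py | categorize_post
-- ===== SOURCE A (Python) =====
-- def categorize_post(title, content=""):
--     """Categorize post based on title and content to choose appropriate image."""
--     title_lower = title.lower()
--     content_lower = content.lower()
--     text = f"{title_lower} {content_lower}"
--
--     if any(word in text for word in ['travel', 'visa', 'destination', 'tourism', 'trip', 'nomad']):
--         return 'travel'
--     elif any(word in text for word in ['business', 'trade', 'startup', 'funding', 'investor']):
--         return 'business'
--     elif any(word in text for word in ['ai', 'technology', 'cloud', 'software', 'digital', 'tech']):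
--         return 'technology'
--     elif any(word in text for word in ['inflation', 'economy', 'financial', 'money', 'budget']):
--         return 'finance'
--     elif any(word in text for word in ['election', 'political', 'politics', 'democratic', 'government']):
--         return 'politics'
--     else:
--         return 'general'
-- ===== SOURCE B (Python) =====
-- _GROUPS = [
--     ('travel', ['travel', 'visa', 'destination', 'tourism', 'trip', 'nomad']),
--     ('business', ['business', 'trade', 'startup', 'funding', 'investor']),
--     ('technology', ['ai', 'technology', 'cloud', 'software', 'digital', 'tech']),
--     ('finance', ['inflation', 'economy', 'financial', 'money', 'budget']),
--     ('politics', ['election', 'political', 'politics', 'democratic', 'government']),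
-- ]
-- # Flat priority table: (keyword, rank, category), rank = original group order.
-- _KEYWORD_TABLE = [(kw, rank, cat)
--                   for rank, (cat, kws) in enumerate(_GROUPS)
--                   for kw in kws]
--
-- def categorize_post(title, content=""):
--     """Categorize post based on title and content to choose appropriate image."""
--     text = f"{title.lower()} {content.lower()}"
--     best = None
--     for kw, rank, cat in _KEYWORD_TABLE:
--         if kw in text and (best is None or rank < best[0]):
--             best = (rank, cat)
--     return best[1] if best is not None else 'general'
-- ===== Notes on version B (the rewrite author's own statement) =====
-- stated objective: alternative
-- what changed: Replaces A's chain of short-circuiting any() group checks with one flat ordered keyword->(rank,category) table scanned in a single pass that keeps the minimum-rank match.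
import Mathlib
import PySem

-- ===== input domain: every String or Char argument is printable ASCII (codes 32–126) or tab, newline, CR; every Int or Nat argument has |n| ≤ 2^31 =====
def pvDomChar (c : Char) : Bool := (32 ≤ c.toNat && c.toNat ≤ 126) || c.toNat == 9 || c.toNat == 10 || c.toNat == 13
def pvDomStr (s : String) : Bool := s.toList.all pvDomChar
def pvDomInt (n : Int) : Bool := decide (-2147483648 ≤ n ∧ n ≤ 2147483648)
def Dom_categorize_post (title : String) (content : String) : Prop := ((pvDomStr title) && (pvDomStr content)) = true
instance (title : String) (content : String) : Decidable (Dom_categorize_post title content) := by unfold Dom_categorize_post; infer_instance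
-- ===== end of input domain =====

-- B is an alternative decomposition (flat priority keyword table + one min-rank pass) of A's first-matching-group scan; same cost.

-- ===== PORT A =====
def categorize_post (title : String) (content : String) : String :=
  let title_lower := PySem.Chars.lower title.toList
  let content_lower := PySem.Chars.lower content.toList
  let text := title_lower ++ ' ' :: content_lower
  if (["travel", "visa", "destination", "tourism", "trip", "nomad"].any
      (fun w => PySem.Chars.isIn w.toList text)) then "travel"
  else if (["business", "trade", "startup", "funding", "investor"].any
      (fun w => PySem.Chars.isIn w.toList text)) then "business"
  else if (["ai", "technology", "cloud", "software", "digital", "tech"].any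
      (fun w => PySem.Chars.isIn w.toList text)) then "technology"
  else if (["inflation", "economy", "financial", "money", "budget"].any
      (fun w => PySem.Chars.isIn w.toList text)) then "finance"
  else if (["election", "political", "politics", "democratic", "government"].any
      (fun w => PySem.Chars.isIn w.toList text)) then "politics"
  else "general"

-- ===== PORT B =====
def pvGroups : List (String × List String) :=
  [("travel", ["travel", "visa", "destination", "tourism", "trip", "nomad"]),
   ("business", ["business", "trade", "startup", "funding", "investor"]),
   ("technology", ["ai", "technology", "cloud", "software", "digital", "tech"]),
   ("finance", ["inflation", "economy", "financial", "money", "budget"]),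
   ("politics", ["election", "political", "politics", "democratic", "government"])]

-- flat priority table (keyword, rank, category) built from the groups, as in Source B
def pvKeywordTable : List (String × Int × String) :=
  (PySem.List.enumerate pvGroups).flatMap (fun rg => rg.2.2.map (fun kw => (kw, rg.1, rg.2.1)))

-- loop body of B: keep the minimum-rank match seen so far
def pvStep (text : List Char) (best : Option (Int × String)) (p : String × Int × String) :
    Option (Int × String) :=
  if PySem.Chars.isIn p.1.toList text then
    match best with
    | none => some (p.2.1, p.2.2)
    | some (r, c) => if p.2.1 < r then some (p.2.1, p.2.2) else some (r, c)
  else best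

def categorize_post_alt (title : String) (content : String) : String :=
  let text := PySem.Chars.lower title.toList ++ ' ' :: PySem.Chars.lower content.toList
  match pvKeywordTable.foldl (pvStep text) none with
  | some (_, c) => c
  | none => "general"

-- ===== PRECONDITION & SPEC =====
def Spec_categorize_post (title : String) (content : String) (out : String) : Prop := out = categorize_post_alt title content
instance (title : String) (content : String) (out : String) : Decidable (Spec_categorize_post title content out) := by unfold Spec_categorize_post; infer_instance

-- ===== CLAIM (what is proved, stated in full; the proofs are below) =====
def Claim_equal_categorize_post : Prop := ∀ (title : String) (content : String), Dom_categorize_post title content → Spec_categorize_post title content (categorize_post title content)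

-- ===== LEMMAS AND PROOFS =====

-- once B holds a best of rank r and every remaining rank is ≥ r, the fold never changes it
theorem pv_fold_some (text : List Char) (l : List (String × Int × String)) (r : Int)
    (c : String) (h : ∀ p ∈ l, r ≤ p.2.1) :
    l.foldl (pvStep text) (some (r, c)) = some (r, c) := by
  induction l with
  | nil => rfl
  | cons p l ih =>
    have hr : r ≤ p.2.1 := h p (by simp)
    have hstep : pvStep text (some (r, c)) p = some (r, c) := by
      unfold pvStep
      split
      · simp [Int.not_lt.mpr hr]
      · rfl
    rw [List.foldl_cons, hstep]
    exact ih (fun q hq => h q (by simp [hq]))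

-- on a rank-sorted table, B's min-rank fold returns the first matching entry
theorem pv_fold_none (text : List Char) (l : List (String × Int × String))
    (hp : l.Pairwise (fun p q => p.2.1 ≤ q.2.1)) :
    l.foldl (pvStep text) none =
      (l.find? (fun p => PySem.Chars.isIn p.1.toList text)).map (fun p => (p.2.1, p.2.2)) := by
  induction l with
  | nil => rfl
  | cons p l ih =>
    rw [List.pairwise_cons] at hp
    by_cases hm : PySem.Chars.isIn p.1.toList text
    · rw [List.foldl_cons]
      have hstep : pvStep text none p = some (p.2.1, p.2.2) := by simp [pvStep, hm]
      rw [hstep, pv_fold_some text l p.2.1 p.2.2 hp.1]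
      simp [hm]
    · rw [List.foldl_cons]
      have hstep : pvStep text none p = none := by simp [pvStep, hm]
      rw [hstep]
      simp only [List.find?_cons, hm]
      exact ih hp.2

-- first match within one constant-rank group = any-match of its keywords
theorem pv_find_group (text : List Char) (ws : List String) (r : Int) (c : String) :
    ((ws.map (fun w => (w, r, c))).find? (fun p => PySem.Chars.isIn p.1.toList text)).map
        (fun p => (p.2.1, p.2.2)) =
      if ws.any (fun w => PySem.Chars.isIn w.toList text) then some (r, c) else none := by
  induction ws with
  | nil => rfl
  | cons w ws ih =>
    by_cases hm : PySem.Chars.isIn w.toList text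
    · simp [hm]
    · simp only [List.map_cons, List.find?_cons, List.any_cons, hm, Bool.false_or]
      exact ih

theorem pv_map_or {α β : Type} (f : α → β) (x y : Option α) :
    (x.or y).map f = (x.map f).or (y.map f) := by
  cases x <;> rfl

-- ===== VERDICT (by name: the statement is the Claim_ definition above) =====
theorem categorize_post_spec : Claim_equal_categorize_post := by
  intro title content _
  unfold Spec_categorize_post categorize_post categorize_post_alt
  dsimp only
  rw [pv_fold_none _ _ (by decide)]
  generalize hT : PySem.Chars.lower title.toList ++ ' ' :: PySem.Chars.lower content.toList = text
  rw [show pvKeywordTable =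
      (["travel", "visa", "destination", "tourism", "trip", "nomad"].map (fun w => (w, (0 : Int), "travel"))) ++
      ((["business", "trade", "startup", "funding", "investor"].map (fun w => (w, (1 : Int), "business"))) ++
      ((["ai", "technology", "cloud", "software", "digital", "tech"].map (fun w => (w, (2 : Int), "technology"))) ++
      ((["inflation", "economy", "financial", "money", "budget"].map (fun w => (w, (3 : Int), "finance"))) ++
      (["election", "political", "politics", "democratic", "government"].map (fun w => (w, (4 : Int), "politics"))))))
    from rfl]
  simp only [List.find?_append, pv_map_or, pv_find_group]
  by_cases h0 : (["travel", "visa", "destination", "tourism", "trip", "nomad"].any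
      (fun w => PySem.Chars.isIn w.toList text)) <;>
  by_cases h1 : (["business", "trade", "startup", "funding", "investor"].any
      (fun w => PySem.Chars.isIn w.toList text)) <;>
  by_cases h2 : (["ai", "technology", "cloud", "software", "digital", "tech"].any
      (fun w => PySem.Chars.isIn w.toList text)) <;>
  by_cases h3 : (["inflation", "economy", "financial", "money", "budget"].any
      (fun w => PySem.Chars.isIn w.toList text)) <;>
  by_cases h4 : (["election", "political", "politics", "democratic", "government"].any
      (fun w => PySem.Chars.isIn w.toList text)) <;>
  simp [h0, h1, h2, h3, h4]
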